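-- pv_equiv track=rewrite | github.com/lukexodus/hanapsalita-data | scrapeUtils.py | sortAlphabetically
-- ===== SOURCE A (Python) =====
-- def sortAlphabetically(word):
--     wordList = list(word)
--     wordList.sort()
--     alphaSorted = "".join(wordList)
--     alphaSortedNoDuplicates = []
--     i = 0
--     while wordList:
--         if wordList[0] not in alphaSortedNoDuplicates:
--             alphaSortedNoDuplicates += wordList[0]
--         wordList.pop(0)
--     alphaSortedNoDuplicates = "".join(alphaSortedNoDuplicates)
--     return alphaSorted, alphaSortedNoDuplicates
-- ===== SOURCE B (Python) =====
-- def sortAlphabetically(word):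
--     return "".join(sorted(word)), "".join(sorted(set(word)))
-- ===== Notes on version B (the rewrite author's own statement) =====
-- stated objective: simpler
-- what changed: B deduplicates first with set(word) and then sorts, replacing A's sort-then-scan loop that pops the sorted list and maintains a running unique accumulator with membership tests.
import Mathlib
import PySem

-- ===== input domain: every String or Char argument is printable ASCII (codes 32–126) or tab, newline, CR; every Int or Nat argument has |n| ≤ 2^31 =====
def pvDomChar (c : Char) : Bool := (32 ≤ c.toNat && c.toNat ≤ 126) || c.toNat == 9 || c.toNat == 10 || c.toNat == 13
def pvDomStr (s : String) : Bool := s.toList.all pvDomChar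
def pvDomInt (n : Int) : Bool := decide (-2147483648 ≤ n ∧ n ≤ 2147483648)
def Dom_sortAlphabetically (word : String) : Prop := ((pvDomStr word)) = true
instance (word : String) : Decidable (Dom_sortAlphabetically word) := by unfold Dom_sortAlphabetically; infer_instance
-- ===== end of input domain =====

-- B deduplicates first (set(word)) and then sorts, replacing A's sort-then-scan accumulator loop; objective: simpler.

-- ===== PORT A =====
-- A's while loop: pop from the front of the sorted list, append to the accumulator if not already present.
def sortAlphabeticallyLoop (ws acc : List Char) : List Char :=
  match ws with
  | [] => acc
  | x :: rest => if x ∈ acc then sortAlphabeticallyLoop rest acc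
                 else sortAlphabeticallyLoop rest (acc ++ [x])

def sortAlphabetically (word : String) : String × String :=
  let wordList := PySem.List.sorted word.toList (fun c => c) false
  let alphaSorted := String.ofList wordList
  let alphaSortedNoDuplicates := sortAlphabeticallyLoop wordList []
  (alphaSorted, String.ofList alphaSortedNoDuplicates)

-- ===== PORT B =====
def sortAlphabetically_alt (word : String) : String × String :=
  (String.ofList (PySem.List.sorted word.toList (fun c => c) false),
   String.ofList (PySem.List.sorted (PySem.Set.ofList word.toList) (fun c => c) false))

-- ===== PRECONDITION & SPEC =====
def Spec_sortAlphabetically (word : String) (out : String × String) : Prop := out = sortAlphabetically_alt word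
instance (word : String) (out : String × String) : Decidable (Spec_sortAlphabetically word out) := by unfold Spec_sortAlphabetically; infer_instance

-- ===== CLAIM (what is proved, stated in full; the proofs are below) =====
def Claim_equal_sortAlphabetically : Prop := ∀ (word : String), Dom_sortAlphabetically word → Spec_sortAlphabetically word (sortAlphabetically word)

-- ===== LEMMAS AND PROOFS =====

-- A's accumulator loop is foldl of Python set-add (keep first occurrences).
theorem loop_eq_foldl (ws : List Char) : ∀ acc : List Char,
    sortAlphabeticallyLoop ws acc = List.foldl PySem.Set.add acc ws := by
  induction ws with
  | nil => intro acc; rfl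
  | cons x rest ih =>
    intro acc
    simp only [sortAlphabeticallyLoop, List.foldl, PySem.Set.add, PySem.Set.contains]
    by_cases h : x ∈ acc <;> simp [h, ih]

theorem foldl_add_sublist (ws : List Char) : ∀ acc : List Char,
    List.Sublist (List.foldl PySem.Set.add acc ws) (acc ++ ws) := by
  induction ws with
  | nil => intro acc; simp
  | cons x rest ih =>
    intro acc
    simp only [List.foldl, PySem.Set.add, PySem.Set.contains]
    by_cases h : x ∈ acc
    · simp [h]
      exact (ih acc).trans (by simp)
    · simp [h]
      exact (by simpa using ih (acc ++ [x]))

-- dedup-then-sort equals ordered dedup of the sorted list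
theorem ofList_sorted_eq (l : List Char) :
    PySem.List.sorted (PySem.Set.ofList l) (fun c => c) false
      = PySem.Set.ofList (PySem.List.sorted l (fun c => c) false) := by
  apply PySem.List.sorted_eq_of_perm_of_pairwise_lt
  · -- permutation: both are nodup and have the same members
    refine (List.perm_ext_iff_of_nodup ?_ ?_).mpr ?_
    · exact PySem.Set.nodup_ofList _
    · exact PySem.Set.nodup_ofList _
    · intro a
      simp [PySem.Set.mem_ofList, PySem.List.mem_sorted]
  · -- strictly increasing: sublist of the sorted list, plus nodup
    have hsub : List.Sublist (PySem.Set.ofList (PySem.List.sorted l (fun c => c) false))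
        (PySem.List.sorted l (fun c => c) false) := by
      have := foldl_add_sublist (PySem.List.sorted l (fun c => c) false) []
      simpa [PySem.Set.ofList_eq_foldl] using this
    have hle : (PySem.Set.ofList (PySem.List.sorted l (fun c => c) false)).Pairwise (· ≤ ·) :=
      (PySem.List.sorted_pairwise l (fun c => c)).sublist hsub
    have hne : (PySem.Set.ofList (PySem.List.sorted l (fun c => c) false)).Pairwise (· ≠ ·) :=
      PySem.Set.nodup_ofList _
    exact (hle.and hne).imp (fun h => lt_of_le_of_ne h.1 h.2)

-- ===== VERDICT (by name: the statement is the Claim_ definition above) =====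
theorem sortAlphabetically_spec : Claim_equal_sortAlphabetically := by
  intro word _
  unfold Spec_sortAlphabetically sortAlphabetically sortAlphabetically_alt
  simp only [loop_eq_foldl, ← PySem.Set.ofList_eq_foldl, ofList_sorted_eq]
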